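-- pv_equiv track=rewrite | github.com/daniel-reich/ubiquitous-fiesta | Y4gwcGfcGb3SKz6Tu_9.py | max_separator
-- ===== SOURCE A (Python) =====
-- def max_separator(txt):
--   res = {}
--   for i,c in enumerate(txt):
--     for j in range(i+1,len(txt)):
--       if txt[j] == c:
--         if c not in res or res[c] < j+1-i:
--           res[c] = j+1-i
--         break
--   return sorted([k for k,v in res.items() if v == max(res.values())]) if res else []
-- ===== SOURCE B (Python) =====
-- def max_separator(txt):
--   last = {}
--   res = {}
--   for i, c in enumerate(txt):
--     if c in last:
--       g = i - last[c] + 1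
--       if c not in res or res[c] < g:
--         res[c] = g
--     last[c] = i
--   if not res:
--     return []
--   m = max(res.values())
--   return sorted([k for k, v in res.items() if v == m])
-- ===== Notes on version B (the rewrite author's own statement) =====
-- stated objective: faster
-- what changed: Replaces A's forward scan for the next equal character at every position (nested loops) with a single pass that keeps each character's last seen index in a dict and updates the max consecutive gap on the fly, and computes max(res.values()) once instead of per item.
import Mathlib
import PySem

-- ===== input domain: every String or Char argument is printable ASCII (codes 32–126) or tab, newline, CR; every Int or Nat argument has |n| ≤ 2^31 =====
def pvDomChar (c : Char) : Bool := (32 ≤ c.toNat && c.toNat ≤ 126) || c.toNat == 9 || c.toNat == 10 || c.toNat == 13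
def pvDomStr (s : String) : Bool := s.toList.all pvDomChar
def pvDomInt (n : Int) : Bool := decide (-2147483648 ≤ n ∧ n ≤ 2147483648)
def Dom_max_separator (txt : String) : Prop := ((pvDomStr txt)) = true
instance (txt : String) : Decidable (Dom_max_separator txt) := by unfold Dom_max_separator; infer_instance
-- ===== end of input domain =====

-- B replaces A's quadratic forward rescans with a one-pass last-index dict (O(n) vs O(n^2)).

-- ===== PORT A =====
-- A's update 'if c not in res or res[c] < g: res[c] = g'
def pvUpdA (res : PySem.Dict Char Int) (c : Char) (g : Int) : PySem.Dict Char Int :=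
  if !res.contains c || res.getD c 0 < g then res.insert c g else res

-- A's inner loop 'for j in range(i+1, len(txt)): if txt[j] == c: <update>; break'
def pvInnerA (u : List Char) (i : Int) (c : Char) (res : PySem.Dict Char Int) :
    List Int → PySem.Dict Char Int
  | [] => res
  | j :: js =>
    if PySem.List.pyGetD u j ' ' == c then pvUpdA res c (j + 1 - i)
    else pvInnerA u i c res js

-- A's return line; the dict keys are single characters, so sorting the chars and then
-- forming the 1-character strings is exact for Python's sort of the 1-character strings.
def pvTailA (res : PySem.Dict Char Int) : List String :=
  match res.items with
  | [] => []
  | _ :: _ =>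
      (PySem.List.sorted
        ((res.items.filter
            (fun kv => kv.2 == (PySem.List.max? res.values (fun v => v)).getD 0)).map
          (fun kv => kv.1)) (fun c => c) false).map (fun c => String.ofList [c])

def max_separator (txt : String) : List String :=
  let u := txt.toList
  let n : Int := (u.length : Int)
  let res := (PySem.List.enumerate u 0).foldl
      (fun res p => pvInnerA u p.1 p.2 res (PySem.List.pyRange (p.1 + 1) n 1))
      PySem.Dict.empty
  pvTailA res

-- ===== PORT B =====
-- one pass: track each char's last index; on a repeat, update the max consecutive gap
def pvStepB (st : PySem.Dict Char Int × PySem.Dict Char Int) (p : Int × Char) :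
    PySem.Dict Char Int × PySem.Dict Char Int :=
  let res :=
    match st.1.get? p.2 with
    | some l =>
        let g := p.1 - l + 1
        if !st.2.contains p.2 || st.2.getD p.2 0 < g then st.2.insert p.2 g else st.2
    | none => st.2
  (st.1.insert p.2 p.1, res)

-- B's return lines ('if not res: return []', one max, one sorted); chars sorted as in pvTailA
def pvTailB (res : PySem.Dict Char Int) : List String :=
  match res.items with
  | [] => []
  | _ :: _ =>
      let m := (PySem.List.max? res.values (fun v => v)).getD 0
      (PySem.List.sorted ((res.items.filter (fun kv => kv.2 == m)).map (fun kv => kv.1))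
        (fun c => c) false).map (fun c => String.ofList [c])

def max_separator_alt (txt : String) : List String :=
  let st := (PySem.List.enumerate txt.toList 0).foldl pvStepB
      (PySem.Dict.empty, PySem.Dict.empty)
  pvTailB st.2

-- ===== PRECONDITION & SPEC =====
def Spec_max_separator (txt : String) (out : List String) : Prop := out = max_separator_alt txt
instance (txt : String) (out : List String) : Decidable (Spec_max_separator txt out) := by unfold Spec_max_separator; infer_instance

-- ===== CLAIM (what is proved, stated in full; the proofs are below) =====
def Claim_equal_max_separator : Prop := ∀ (txt : String), Dom_max_separator txt → Spec_max_separator txt (max_separator txt)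

-- ===== LEMMAS AND PROOFS =====

-- abstract map view of the two dicts (get?-level), used only by the proofs
def pvM := Char → Option Int

def updM (m : pvM) (c : Char) (g : Int) : pvM :=
  fun c' => if c' = c then some (max ((m c).getD g) g) else m c'

def updL (m : pvM) (c : Char) (i : Int) : pvM :=
  fun c' => if c' = c then some i else m c'

def firstHit (u : List Char) (c : Char) : List Int → Option Int
  | [] => none
  | j :: js => if PySem.List.pyGetD u j ' ' == c then some j else firstHit u c js

def stepAM (u : List Char) (n : Int) (m : pvM) (p : Int × Char) : pvM :=
  match firstHit u p.2 (PySem.List.pyRange (p.1 + 1) n 1) with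
  | none => m
  | some j => updM m p.2 (j + 1 - p.1)

def stepBM (st : pvM × pvM) (p : Int × Char) : pvM × pvM :=
  (updL st.1 p.2 p.1,
   match st.1 p.2 with
   | some l => updM st.2 p.2 (p.1 - l + 1)
   | none => st.2)

def lastIdx? (u : List Char) (x : Char) : Option Int :=
  (PySem.List.enumerate u 0).foldl (fun a p => if p.2 == x then some p.1 else a) none

def specialP (u : List Char) (n : Int) (x : Char) (p : Int × Char) : Bool :=
  p.2 == x && (firstHit u p.2 (PySem.List.pyRange (p.1 + 1) n 1)).isNone

def runA (u : List Char) : pvM :=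
  (PySem.List.enumerate u 0).foldl (stepAM u (u.length : Int)) (fun _ => none)

def runB (u : List Char) : pvM × pvM :=
  (PySem.List.enumerate u 0).foldl stepBM ((fun _ => none), (fun _ => none))

theorem pvUpdA_get? (res : PySem.Dict Char Int) (c : Char) (g : Int) :
    (pvUpdA res c g).get? = updM res.get? c g := by
  funext c'
  unfold pvUpdA updM
  rcases hg : res.get? c with _ | v
  · have hc : res.contains c = false := by
      rw [PySem.Dict.contains_eq_isSome_get?, hg]; rfl
    simp [hc, PySem.Dict.get?_insert]
  · have hc : res.contains c = true := by
      rw [PySem.Dict.contains_eq_isSome_get?, hg]; rfl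
    have hd : res.getD c 0 = v := by rw [PySem.Dict.getD_eq_get?_getD, hg]; rfl
    by_cases hlt : v < g
    · simp [hc, hd, hlt, PySem.Dict.get?_insert, max_eq_right hlt.le]
    · rw [if_neg (by simp [hc, hd, hlt])]
      by_cases h : c' = c
      · subst h; rw [hg, if_pos rfl, Option.getD_some, max_eq_left (by omega)]
      · rw [if_neg h]

theorem pvInnerA_get? (u : List Char) (i : Int) (c : Char) (res : PySem.Dict Char Int)
    (js : List Int) :
    (pvInnerA u i c res js).get? =
      match firstHit u c js with
      | none => res.get?
      | some j => updM res.get? c (j + 1 - i) := by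
  induction js with
  | nil => rfl
  | cons j js ih =>
    show (if PySem.List.pyGetD u j ' ' == c then pvUpdA res c (j + 1 - i)
          else pvInnerA u i c res js).get? = _
    unfold firstHit
    by_cases h : PySem.List.pyGetD u j ' ' == c
    · simp [h, pvUpdA_get?]
    · simp [h, ih]

theorem foldA_get? (u : List Char) (n : Int) (l : List (Int × Char))
    (res : PySem.Dict Char Int) :
    ((l.foldl (fun res p => pvInnerA u p.1 p.2 res (PySem.List.pyRange (p.1 + 1) n 1)) res)).get?
      = l.foldl (stepAM u n) res.get? := by
  induction l generalizing res with
  | nil => rfl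
  | cons p l ih =>
    simp only [List.foldl_cons]
    rw [ih, pvInnerA_get?]
    rfl

theorem foldB_get? (l : List (Int × Char)) (st : PySem.Dict Char Int × PySem.Dict Char Int) :
    ((l.foldl pvStepB st).1.get?, (l.foldl pvStepB st).2.get?)
      = l.foldl stepBM (st.1.get?, st.2.get?) := by
  induction l generalizing st with
  | nil => rfl
  | cons p l ih =>
    simp only [List.foldl_cons]
    rw [ih]
    congr 1
    unfold pvStepB stepBM
    refine Prod.ext ?_ ?_
    · funext c'
      simp only [PySem.Dict.get?_insert, updL]
    · rcases h : st.1.get? p.2 with _ | lst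
      · simp [h]
      · simp only [h]
        exact pvUpdA_get? st.2 p.2 (p.1 - lst + 1)

theorem updM_comm (m : pvM) (c1 c2 : Char) (g1 g2 : Int) :
    updM (updM m c1 g1) c2 g2 = updM (updM m c2 g2) c1 g1 := by
  funext c'
  unfold updM
  by_cases h12 : c2 = c1
  · subst h12
    by_cases h : c' = c2 <;> simp only [h, if_pos] <;>
      cases m c2 <;> simp <;> omega
  · by_cases h1 : c' = c1 <;> by_cases h2 : c' = c2 <;>
      simp [h1, h2, h12, Ne.symm h12]

theorem foldA_updM_comm (u : List Char) (n : Int) (x : Char) (g : Int) :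
    ∀ (l : List (Int × Char)) (m : pvM),
      l.foldl (stepAM u n) (updM m x g) = updM (l.foldl (stepAM u n) m) x g := by
  intro l
  induction l with
  | nil => intro m; rfl
  | cons p l ih =>
    intro m
    simp only [List.foldl_cons]
    have hstep : stepAM u n (updM m x g) p = updM (stepAM u n m p) x g := by
      unfold stepAM
      rcases firstHit u p.2 (PySem.List.pyRange (p.1 + 1) n 1) with _ | j
      · rfl
      · exact updM_comm m x p.2 g (j + 1 - p.1)
    rw [hstep, ih]

theorem firstHit_append (u : List Char) (c : Char) (l1 l2 : List Int) :
    firstHit u c (l1 ++ l2) =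
      (match firstHit u c l1 with | some j => some j | none => firstHit u c l2) := by
  induction l1 with
  | nil => rfl
  | cons j js ih =>
    have e1 : firstHit u c ((j :: js) ++ l2)
        = if PySem.List.pyGetD u j ' ' == c then some j else firstHit u c (js ++ l2) := rfl
    have e2 : firstHit u c (j :: js)
        = if PySem.List.pyGetD u j ' ' == c then some j else firstHit u c js := rfl
    rw [e1, e2]
    by_cases h : PySem.List.pyGetD u j ' ' == c
    · rw [if_pos h, if_pos h]
    · rw [if_neg h, if_neg h, ih]

theorem firstHit_congr (u : List Char) (x c : Char) (l : List Int)
    (h : ∀ j ∈ l, 0 ≤ j ∧ j < (u.length : Int)) :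
    firstHit (u ++ [x]) c l = firstHit u c l := by
  induction l with
  | nil => rfl
  | cons j js ih =>
    obtain ⟨h0, hlt⟩ := h j (List.mem_cons_self ..)
    have hget : PySem.List.pyGetD (u ++ [x]) j ' ' = PySem.List.pyGetD u j ' ' := by
      rw [PySem.List.pyGetD_eq_getElem (u ++ [x]) ' ' h0 (by simp; omega),
          PySem.List.pyGetD_eq_getElem u ' ' h0 (by simpa using hlt)]
      exact List.getElem_append_left (by omega)
    unfold firstHit
    rw [hget, ih (fun j hj => h j (List.mem_cons_of_mem _ hj))]

theorem hitExt (u : List Char) (y c : Char) (i : Int) (h0 : 0 ≤ i) (hlt : i < (u.length : Int)) :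
    firstHit (u ++ [y]) c (PySem.List.pyRange (i + 1) ((u.length : Int) + 1) 1)
      = (match firstHit u c (PySem.List.pyRange (i + 1) (u.length : Int) 1) with
         | some j => some j
         | none => if y == c then some (u.length : Int) else none) := by
  have hsplit : PySem.List.pyRange (i + 1) ((u.length : Int) + 1) 1
      = PySem.List.pyRange (i + 1) (u.length : Int) 1 ++ [(u.length : Int)] :=
    PySem.List.pyRange_one_succ_right (by omega)
  have hbnds : ∀ j ∈ PySem.List.pyRange (i + 1) (u.length : Int) 1, 0 ≤ j ∧ j < (u.length : Int) := by
    intro j hj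
    rw [PySem.List.mem_pyRange_one] at hj
    omega
  have hgetn : PySem.List.pyGetD (u ++ [y]) (u.length : Int) ' ' = y := by
    rw [PySem.List.pyGetD_eq_getElem (u ++ [y]) ' ' (by omega) (by simp)]
    simp
  rw [hsplit, firstHit_append, firstHit_congr u y c _ hbnds]
  rcases firstHit u c (PySem.List.pyRange (i + 1) (u.length : Int) 1) with _ | j
  · show firstHit (u ++ [y]) c [(u.length : Int)] = _
    have e : firstHit (u ++ [y]) c [(u.length : Int)]
        = if PySem.List.pyGetD (u ++ [y]) (u.length : Int) ' ' == c then some (u.length : Int)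
          else none := rfl
    rw [e, hgetn]
  · rfl

theorem keyA (u : List Char) (x : Char) :
    ∀ (l : List (Int × Char)) (m : pvM), (∀ p ∈ l, 0 ≤ p.1 ∧ p.1 < (u.length : Int)) →
      l.foldl (stepAM (u ++ [x]) ((u.length : Int) + 1)) m
        = (l.filter (specialP u (u.length : Int) x)).foldl
            (fun m0 p => updM m0 x ((u.length : Int) + 1 - p.1))
            (l.foldl (stepAM u (u.length : Int)) m) := by
  intro l
  induction l with
  | nil => intro m _; rfl
  | cons p l ih =>
    intro m hb
    obtain ⟨h0, hlt⟩ := hb p (List.mem_cons_self ..)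
    have hbl : ∀ q ∈ l, 0 ≤ q.1 ∧ q.1 < (u.length : Int) :=
      fun q hq => hb q (List.mem_cons_of_mem _ hq)
    have hhit := hitExt u x p.2 p.1 h0 hlt
    simp only [List.foldl_cons]
    rcases hfh : firstHit u p.2 (PySem.List.pyRange (p.1 + 1) (u.length : Int) 1) with _ | j
    · have horig : stepAM u (u.length : Int) m p = m := by
        unfold stepAM; rw [hfh]
      by_cases hx : p.2 = x
      · have hspec : specialP u (u.length : Int) x p = true := by
          unfold specialP; rw [hfh]; simp [hx]
        have hext : stepAM (u ++ [x]) ((u.length : Int) + 1) m p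
            = updM m x ((u.length : Int) + 1 - p.1) := by
          unfold stepAM; rw [hhit, hfh]; simp [hx]
        rw [hext, horig, ih (updM m x ((u.length : Int) + 1 - p.1)) hbl,
            List.filter_cons_of_pos hspec]
        simp only [List.foldl_cons]
        rw [foldA_updM_comm]
      · have hspec : specialP u (u.length : Int) x p = false := by
          unfold specialP; simp [hx]
        have hxp : (x == p.2) = false := beq_eq_false_iff_ne.mpr (fun hh => hx hh.symm)
        have hext : stepAM (u ++ [x]) ((u.length : Int) + 1) m p = m := by
          unfold stepAM; rw [hhit, hfh]; simp [hxp]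
        rw [hext, horig, ih m hbl, List.filter_cons_of_neg (by simp [hspec])]
    · have horig : stepAM u (u.length : Int) m p = updM m p.2 (j + 1 - p.1) := by
        unfold stepAM; rw [hfh]
      have hext : stepAM (u ++ [x]) ((u.length : Int) + 1) m p
          = updM m p.2 (j + 1 - p.1) := by
        unfold stepAM; rw [hhit, hfh]
      have hspec : specialP u (u.length : Int) x p = false := by
        unfold specialP; rw [hfh]; simp
      rw [hext, horig, ih (updM m p.2 (j + 1 - p.1)) hbl,
          List.filter_cons_of_neg (by simp [hspec])]

theorem lastIdx?_snoc (u : List Char) (x' x : Char) :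
    lastIdx? (u ++ [x']) x = if x' == x then some (u.length : Int) else lastIdx? u x := by
  unfold lastIdx?
  rw [PySem.List.enumerate_append, List.foldl_append]
  simp [PySem.List.enumerate_cons]

theorem filterSpecial (u : List Char) (x : Char) :
    (PySem.List.enumerate u 0).filter (specialP u (u.length : Int) x)
      = (match lastIdx? u x with | none => [] | some i0 => [(i0, x)]) := by
  induction u using List.reverseRecOn with
  | nil => rfl
  | append_singleton u x' ih =>
    have hlen : (((u ++ [x']).length : Nat) : Int) = (u.length : Int) + 1 := by simp
    have henum : PySem.List.enumerate (u ++ [x']) 0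
        = PySem.List.enumerate u 0 ++ [((u.length : Int), x')] := by
      rw [PySem.List.enumerate_append]
      simp [PySem.List.enumerate_cons]
    rw [henum, List.filter_append, hlen]
    -- old elements
    have hold : (PySem.List.enumerate u 0).filter (specialP (u ++ [x']) ((u.length : Int) + 1) x)
        = (PySem.List.enumerate u 0).filter
            (fun p => specialP u (u.length : Int) x p && !(x' == x)) := by
      apply List.filter_congr
      intro p hp
      obtain ⟨k, hk, hpk⟩ := (PySem.List.mem_enumerate_iff u 0 p).mp hp
      have h0 : 0 ≤ p.1 := by rw [hpk]; simp
      have hlt : p.1 < (u.length : Int) := by rw [hpk]; simp; omega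
      have hhit := hitExt u x' p.2 p.1 h0 hlt
      unfold specialP
      rw [hhit]
      rcases firstHit u p.2 (PySem.List.pyRange (p.1 + 1) (u.length : Int) 1) with _ | j
      · by_cases hpx : p.2 = x
        · subst hpx
          by_cases hx : x' = p.2
          · subst hx; simp
          · simp [hx]
        · simp [beq_eq_false_iff_ne.mpr hpx]
      · simp
    rw [hold]
    -- new element
    have hnewrange : PySem.List.pyRange ((u.length : Int) + 1) ((u.length : Int) + 1) 1 = [] :=
      PySem.List.pyRange_one_eq_nil (le_refl _)
    have hnew : specialP (u ++ [x']) ((u.length : Int) + 1) x ((u.length : Int), x') = (x' == x) := by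
      unfold specialP
      rw [hnewrange]
      simp [firstHit]
    rw [lastIdx?_snoc]
    by_cases hx : x' == x
    · have hx' : x' = x := eq_of_beq hx
      subst hx'
      simp [hnew]
    · have hxf : (x' == x) = false := by simpa using hx
      rw [hxf]
      have hemp : List.filter (specialP (u ++ [x']) ((u.length : Int) + 1) x)
          [((u.length : Int), x')] = [] := by
        simp [hnew, hxf]
      rw [hemp, List.append_nil]
      simp only [Bool.not_false, Bool.and_true, Bool.false_eq_true, if_false]
      exact ih

theorem mainAB (u : List Char) :
    (runB u).1 = (fun c => lastIdx? u c) ∧ runA u = (runB u).2 := by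
  induction u using List.reverseRecOn with
  | nil =>
    constructor
    · funext c; rfl
    · rfl
  | append_singleton u x ih =>
    obtain ⟨ih1, ih2⟩ := ih
    have henum : PySem.List.enumerate (u ++ [x]) 0
        = PySem.List.enumerate u 0 ++ [((u.length : Int), x)] := by
      rw [PySem.List.enumerate_append]
      simp [PySem.List.enumerate_cons]
    have hBsnoc : runB (u ++ [x]) = stepBM (runB u) ((u.length : Int), x) := by
      unfold runB
      rw [henum, List.foldl_append]
      rfl
    have hbnds : ∀ p ∈ PySem.List.enumerate u 0, 0 ≤ p.1 ∧ p.1 < (u.length : Int) := by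
      intro p hp
      obtain ⟨k, hk, hpk⟩ := (PySem.List.mem_enumerate_iff u 0 p).mp hp
      rw [hpk]
      constructor
      · simp
      · simp; omega
    have hAsnoc : runA (u ++ [x])
        = (PySem.List.enumerate u 0).foldl (stepAM (u ++ [x]) ((u.length : Int) + 1))
            (fun _ => none) := by
      unfold runA
      have hlen : (((u ++ [x]).length : Nat) : Int) = (u.length : Int) + 1 := by simp
      rw [henum, hlen, List.foldl_append]
      have hlast : stepAM (u ++ [x]) ((u.length : Int) + 1)
          ((PySem.List.enumerate u 0).foldl (stepAM (u ++ [x]) ((u.length : Int) + 1))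
            (fun _ => none)) ((u.length : Int), x)
          = (PySem.List.enumerate u 0).foldl (stepAM (u ++ [x]) ((u.length : Int) + 1))
              (fun _ => none) := by
        unfold stepAM
        have : PySem.List.pyRange ((u.length : Int) + 1) ((u.length : Int) + 1) 1 = [] :=
          PySem.List.pyRange_one_eq_nil (le_refl _)
        rw [this]
        rfl
      simpa using hlast
    constructor
    · rw [hBsnoc]
      funext c
      show updL (runB u).1 x (u.length : Int) c = _
      unfold updL
      rw [ih1, lastIdx?_snoc]
      by_cases h : c = x
      · subst h
        simp
      · have hxc : (x == c) = false := beq_eq_false_iff_ne.mpr (fun hh => h hh.symm)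
        rw [if_neg h, hxc]
        simp
    · rw [hAsnoc, keyA u x (PySem.List.enumerate u 0) (fun _ => none) hbnds, filterSpecial,
          hBsnoc]
      have hB1 : (runB u).1 x = lastIdx? u x := by rw [ih1]
      show (List.foldl (fun m0 p => updM m0 x ((u.length : Int) + 1 - p.1))
            (List.foldl (stepAM u (u.length : Int)) (fun _ => none) (PySem.List.enumerate u 0))
            (match lastIdx? u x with | none => [] | some i0 => [(i0, x)]))
          = (match (runB u).1 x with
             | some l => updM (runB u).2 x ((u.length : Int) - l + 1)
             | none => (runB u).2)
      rw [hB1]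
      rcases hli : lastIdx? u x with _ | i0
      · exact ih2
      · show updM (runA u) x ((u.length : Int) + 1 - i0)
            = updM (runB u).2 x ((u.length : Int) - i0 + 1)
        rw [ih2]
        have harg : ((u.length : Int) + 1 - i0) = ((u.length : Int) - i0 + 1) := by ring
        rw [harg]

theorem pvUpdA_nodup (res : PySem.Dict Char Int) (c : Char) (g : Int)
    (h : res.keys.Nodup) : (pvUpdA res c g).keys.Nodup := by
  unfold pvUpdA
  split
  · exact PySem.Dict.nodup_keys_insert _ _ _ h
  · exact h

theorem pvInnerA_nodup (u : List Char) (i : Int) (c : Char) (res : PySem.Dict Char Int)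
    (js : List Int) (h : res.keys.Nodup) : (pvInnerA u i c res js).keys.Nodup := by
  induction js with
  | nil => exact h
  | cons j js ih =>
    show (if PySem.List.pyGetD u j ' ' == c then pvUpdA res c (j + 1 - i)
          else pvInnerA u i c res js).keys.Nodup
    split
    · exact pvUpdA_nodup _ _ _ h
    · exact ih

theorem keysA_nodup (u : List Char) (n : Int) (l : List (Int × Char))
    (res : PySem.Dict Char Int) (h : res.keys.Nodup) :
    ((l.foldl (fun res p => pvInnerA u p.1 p.2 res (PySem.List.pyRange (p.1 + 1) n 1)) res)).keys.Nodup := by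
  induction l generalizing res with
  | nil => exact h
  | cons p l ih =>
    exact ih _ (pvInnerA_nodup u p.1 p.2 res _ h)

theorem keysB_nodup (l : List (Int × Char)) (st : PySem.Dict Char Int × PySem.Dict Char Int)
    (h : st.2.keys.Nodup) : (l.foldl pvStepB st).2.keys.Nodup := by
  induction l generalizing st with
  | nil => exact h
  | cons p l ih =>
    apply ih
    show (match st.1.get? p.2 with
          | some lst =>
              if !st.2.contains p.2 || st.2.getD p.2 0 < p.1 - lst + 1
              then st.2.insert p.2 (p.1 - lst + 1) else st.2
          | none => st.2).keys.Nodup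
    rcases st.1.get? p.2 with _ | lst
    · exact h
    · exact pvUpdA_nodup st.2 p.2 (p.1 - lst + 1) h

theorem tail_eq (d1 d2 : PySem.Dict Char Int) (h1 : d1.keys.Nodup) (h2 : d2.keys.Nodup)
    (h : ∀ c, d1.get? c = d2.get? c) : pvTailA d1 = pvTailB d2 := by
  have hik1 : d1.items.Nodup := List.Nodup.of_map _ h1
  have hik2 : d2.items.Nodup := List.Nodup.of_map _ h2
  have hitems : d1.items.Perm d2.items := by
    rw [List.perm_ext_iff_of_nodup hik1 hik2]
    intro p
    rw [← PySem.Dict.get?_eq_some_iff_mem_items d1 p.1 p.2 h1,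
        ← PySem.Dict.get?_eq_some_iff_mem_items d2 p.1 p.2 h2, h p.1]
  have hval : d1.values.Perm d2.values := hitems.map _
  rcases e1 : d1.items with _ | ⟨q, t1⟩
  · have e2 : d2.items = [] := (e1 ▸ hitems).symm.eq_nil
    rw [pvTailA, pvTailB, e1, e2]
  · have e2 : d2.items ≠ [] := fun hh => by
      rw [e1] at hitems; rw [hh] at hitems; exact (List.cons_ne_nil _ _) hitems.eq_nil
    have hv1 : d1.values ≠ [] := by
      show d1.items.map (fun kv => kv.2) ≠ []
      rw [e1]; simp
    have hv2 : d2.values ≠ [] := by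
      show d2.items.map (fun kv => kv.2) ≠ []
      intro hh; exact e2 (List.map_eq_nil_iff.mp hh)
    obtain ⟨v1, hm1⟩ : ∃ v, PySem.List.max? d1.values (fun v => v) = some v := by
      rcases hh : PySem.List.max? d1.values (fun v => v) with _ | v
      · exact absurd ((PySem.List.max?_eq_none_iff _ _).mp hh) hv1
      · exact ⟨v, rfl⟩
    obtain ⟨v2, hm2⟩ : ∃ v, PySem.List.max? d2.values (fun v => v) = some v := by
      rcases hh : PySem.List.max? d2.values (fun v => v) with _ | v
      · exact absurd ((PySem.List.max?_eq_none_iff _ _).mp hh) hv2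
      · exact ⟨v, rfl⟩
    have hveq : v1 = v2 := by
      have h12 : v1 ≤ v2 := PySem.List.max?_isMax hm2 v1 (hval.mem_iff.mp (PySem.List.max?_mem hm1))
      have h21 : v2 ≤ v1 := PySem.List.max?_isMax hm1 v2 (hval.mem_iff.mpr (PySem.List.max?_mem hm2))
      omega
    -- reduce both matches to the non-empty branch
    have t1eq : pvTailA d1 =
        (PySem.List.sorted
          ((d1.items.filter
              (fun kv => kv.2 == (PySem.List.max? d1.values (fun v => v)).getD 0)).map
            (fun kv => kv.1)) (fun c => c) false).map (fun c => String.ofList [c]) := by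
      rw [pvTailA, e1]
    have t2eq : pvTailB d2 =
        (PySem.List.sorted
          ((d2.items.filter
              (fun kv => kv.2 == (PySem.List.max? d2.values (fun v => v)).getD 0)).map
            (fun kv => kv.1)) (fun c => c) false).map (fun c => String.ofList [c]) := by
      rw [pvTailB]
      rcases e2' : d2.items with _ | ⟨r, t2⟩
      · exact absurd e2' e2
      · rfl
    rw [t1eq, t2eq, hm1, hm2, hveq]
    congr 1
    apply PySem.List.sorted_eq_sorted_of_perm _ _ _ (fun a b hab => hab)
    exact (hitems.filter _).map _

-- ===== VERDICT (by name: the statement is the Claim_ definition above) =====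
theorem max_separator_spec : Claim_equal_max_separator := by
  unfold Claim_equal_max_separator Spec_max_separator
  intro txt _
  show pvTailA
      ((PySem.List.enumerate txt.toList 0).foldl
        (fun res p => pvInnerA txt.toList p.1 p.2 res
          (PySem.List.pyRange (p.1 + 1) (txt.toList.length : Int) 1))
        PySem.Dict.empty)
    = pvTailB
      ((PySem.List.enumerate txt.toList 0).foldl pvStepB
        (PySem.Dict.empty, PySem.Dict.empty)).2
  apply tail_eq
  · exact keysA_nodup txt.toList (txt.toList.length : Int) _ PySem.Dict.empty
      PySem.Dict.nodup_keys_empty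
  · exact keysB_nodup (PySem.List.enumerate txt.toList 0) (PySem.Dict.empty, PySem.Dict.empty)
      PySem.Dict.nodup_keys_empty
  · have hemp : (PySem.Dict.empty : PySem.Dict Char Int).get? = (fun _ => none) := by
      funext k
      exact PySem.Dict.get?_empty k
    have hA : (((PySem.List.enumerate txt.toList 0).foldl
        (fun res p => pvInnerA txt.toList p.1 p.2 res
          (PySem.List.pyRange (p.1 + 1) (txt.toList.length : Int) 1))
        PySem.Dict.empty)).get? = runA txt.toList := by
      rw [foldA_get?, hemp]
      rfl
    have hB : (((PySem.List.enumerate txt.toList 0).foldl pvStepB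
        (PySem.Dict.empty, PySem.Dict.empty)).2).get? = (runB txt.toList).2 := by
      have h2 := congrArg Prod.snd (foldB_get? (PySem.List.enumerate txt.toList 0)
        (PySem.Dict.empty, PySem.Dict.empty))
      rw [hemp] at h2
      exact h2
    intro c
    exact congrFun (hA.trans (((mainAB txt.toList).2).trans hB.symm)) c
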